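-- pv_equiv track=rewrite | github.com/jiekaitao/SeniorProject | TRM_Spinner/worker/services/data_generator.py | _pegs_to_grid
-- ===== SOURCE A (Python) =====
-- from typing import Any, Dict, List, Tuple
--
-- def _pegs_to_grid(pegs: List[List[int]], height: int) -> List[List[int]]:
--     grid: List[List[int]] = []
--     for row in range(height):
--         r = []
--         for peg in pegs:
--             r.append(peg[row] if row < len(peg) else 0)
--         grid.append(r)
--     return list(reversed(grid))
-- ===== SOURCE B (Python) =====
-- from typing import Any, Dict, List, Tuple
--
-- def _pegs_to_grid(pegs: List[List[int]], height: int) -> List[List[int]]: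
--     # Scatter: pre-allocate a zero grid, write each peg's values into its column.
--     grid: List[List[int]] = [[0] * len(pegs) for _ in range(height)]
--     for j, peg in enumerate(pegs):
--         for row, val in enumerate(peg):
--             if row < height:
--                 grid[row][j] = val
--     return list(reversed(grid))
-- ===== Notes on version B (the rewrite author's own statement) =====
-- stated objective: alternative
-- what changed: B scatters each peg's values column-wise into a pre-allocated zero grid (peg-major traversal) instead of gathering each cell row-major with a per-cell bounds conditional.
import Mathlib
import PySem

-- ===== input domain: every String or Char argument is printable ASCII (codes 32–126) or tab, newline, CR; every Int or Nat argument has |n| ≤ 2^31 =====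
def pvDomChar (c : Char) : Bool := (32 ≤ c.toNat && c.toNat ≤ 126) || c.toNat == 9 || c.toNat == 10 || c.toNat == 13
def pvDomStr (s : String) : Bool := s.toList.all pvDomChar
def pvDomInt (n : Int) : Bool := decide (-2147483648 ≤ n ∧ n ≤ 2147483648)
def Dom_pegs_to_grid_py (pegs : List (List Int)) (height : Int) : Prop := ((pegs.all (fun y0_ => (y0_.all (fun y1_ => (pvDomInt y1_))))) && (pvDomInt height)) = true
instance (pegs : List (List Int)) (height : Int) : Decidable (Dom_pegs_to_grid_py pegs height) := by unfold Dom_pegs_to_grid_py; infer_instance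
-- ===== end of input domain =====

-- B scatters each peg column-wise into a pre-allocated zero grid instead of gathering each
-- cell row-major with a conditional; alternative decomposition, same cost.


-- ===== PORT A =====
-- row-major gather: for each row in range(height), build r by appending
-- 'peg[row] if row < len(peg) else 0' for each peg; the guard makes peg[row] in range,
-- so '.getD 0' below is never the default.
def pegs_to_grid_py (pegs : List (List Int)) (height : Int) : List (List Int) :=
  ((PySem.List.pyRange 0 height 1).foldl
    (fun grid row =>
      grid ++ [pegs.foldl
        (fun r peg =>
          r ++ [if row < (peg.length : Int) then (PySem.List.pyGet? peg row).getD 0 else 0])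
        []])
    []).reverse

-- ===== PORT B =====
-- inner loop of B: 'for row, val in enumerate(peg): if row < height: grid[row][j] = val'
def pvScatterPeg (j : Nat) (height : Int) : List (List Int) → Nat → List Int → List (List Int)
  | g, _, [] => g
  | g, row, v :: rest =>
      pvScatterPeg j height
        (if (row : Int) < height then g.set row ((g.getD row []).set j v) else g)
        (row + 1) rest

-- outer loop of B: 'for j, peg in enumerate(pegs): …'
def pvScatterAll (height : Int) : List (List Int) → Nat → List (List Int) → List (List Int)
  | g, _, [] => g
  | g, j, peg :: rest => pvScatterAll height (pvScatterPeg j height g 0 peg) (j + 1) rest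

def pegs_to_grid_py_alt (pegs : List (List Int)) (height : Int) : List (List Int) :=
  (pvScatterAll height
    ((PySem.List.pyRange 0 height 1).map (fun _ => List.replicate pegs.length 0))
    0 pegs).reverse

-- ===== PRECONDITION & SPEC =====
def Spec_pegs_to_grid_py (pegs : List (List Int)) (height : Int) (out : List (List Int)) : Prop := out = pegs_to_grid_py_alt pegs height
instance (pegs : List (List Int)) (height : Int) (out : List (List Int)) : Decidable (Spec_pegs_to_grid_py pegs height out) := by unfold Spec_pegs_to_grid_py; infer_instance

-- ===== CLAIM (what is proved, stated in full; the proofs are below) =====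
def Claim_equal_pegs_to_grid_py : Prop := ∀ (pegs : List (List Int)) (height : Int), Dom_pegs_to_grid_py pegs height → Spec_pegs_to_grid_py pegs height (pegs_to_grid_py pegs height)

-- ===== LEMMAS AND PROOFS =====

-- the common closed form: the (un-reversed) grid, one cell at a time
def pvCell (height : Int) (i : Nat) (peg : List Int) : Int :=
  if (i : Int) < height ∧ i < peg.length then peg.getD i 0 else 0

-- generic: foldl-append is map
theorem pvFoldlAppendMap {α β : Type} (f : α → β) :
    ∀ (l : List α) (acc : List β),
      l.foldl (fun r x => r ++ [f x]) acc = acc ++ l.map f := by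
  intro l
  induction l with
  | nil => simp
  | cons x t ih => intro acc; simp [List.foldl, ih]

-- A equals the closed form
theorem pvA_closed (pegs : List (List Int)) (height : Int) :
    pegs_to_grid_py pegs height =
      ((List.range height.toNat).map (fun i => pegs.map (pvCell height i))).reverse := by
  unfold pegs_to_grid_py
  rw [PySem.List.pyRange_one]
  congr 1
  have : (0 : Int) - 0 = 0 := by ring
  simp only [Int.sub_zero]
  rw [pvFoldlAppendMap
    (fun row => pegs.foldl
      (fun r peg =>
        r ++ [if row < (peg.length : Int) then (PySem.List.pyGet? peg row).getD 0 else 0]) [])]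
  simp only [List.nil_append, List.map_map]
  apply List.map_congr_left
  intro k hk
  simp only [Function.comp]
  rw [pvFoldlAppendMap
    (fun peg => if ((0 : Int) + k) < (peg.length : Int) then (PySem.List.pyGet? peg ((0 : Int) + k)).getD 0 else 0)]
  simp only [List.nil_append]
  apply List.map_congr_left
  intro peg _
  simp only [List.mem_range] at hk
  have h0 : ((0 : Int) + (k : Int)) = (k : Int) := by ring
  rw [h0, PySem.List.pyGet?_natCast]
  unfold pvCell
  by_cases hlt : k < peg.length
  · have : (k : Int) < (peg.length : Int) := by exact_mod_cast hlt
    have hk2 : (k : Int) < height := by omega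
    simp [hlt, this, hk2, List.getD]
  · have : ¬ (k : Int) < (peg.length : Int) := by exact_mod_cast hlt
    simp [hlt, this]

-- scatterPeg: pointwise
theorem pvScatterPeg_get (j : Nat) (height : Int) :
    ∀ (peg : List Int) (g : List (List Int)) (row i : Nat),
      (pvScatterPeg j height g row peg)[i]? =
        if (i : Int) < height ∧ row ≤ i ∧ i - row < peg.length then
          (g[i]?).map (fun r => r.set j (peg.getD (i - row) 0))
        else g[i]? := by
  intro peg
  induction peg with
  | nil =>
      intro g row i
      simp [pvScatterPeg]
  | cons v rest ih =>
      intro g row i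
      simp only [pvScatterPeg]
      rw [ih]
      by_cases hrow : i = row
      · subst hrow
        have hnot : ¬ ((i : Int) < height ∧ i + 1 ≤ i ∧ i - (i + 1) < rest.length) := by omega
        rw [if_neg hnot]
        by_cases hh : (i : Int) < height
        · rw [if_pos hh]
          have hcond : (i : Int) < height ∧ i ≤ i ∧ i - i < (v :: rest).length := by
            refine ⟨hh, le_refl _, ?_⟩; simp
          rw [if_pos hcond]
          by_cases hib : i < g.length
          · rw [List.getElem?_set_self hib, List.getElem?_eq_getElem hib]
            simp [List.getD, List.getElem?_eq_getElem hib]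
          · have h1 : g[i]? = none := List.getElem?_eq_none (by omega)
            rw [List.getElem?_eq_none (by simpa using (by omega : g.length ≤ i)), h1]
            rfl
        · rw [if_neg hh]
          have : ¬ ((i : Int) < height ∧ i ≤ i ∧ i - i < (v :: rest).length) := by
            intro h; exact hh h.1
          rw [if_neg this]
      · have hset : ∀ x, (g.set row x)[i]? = g[i]? := by
          intro x; exact List.getElem?_set_ne (by omega)
        have hg' : (if (row : Int) < height then g.set row ((g.getD row []).set j v) else g)[i]? = g[i]? := by
          split
          · exact hset _
          · rfl
        rw [hg']
        by_cases hc : (i : Int) < height ∧ row + 1 ≤ i ∧ i - (row + 1) < rest.length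
        · rw [if_pos hc]
          have hc2 : (i : Int) < height ∧ row ≤ i ∧ i - row < (v :: rest).length := by
            refine ⟨hc.1, by omega, by simp; omega⟩
          rw [if_pos hc2]
          have : i - row = (i - (row + 1)) + 1 := by omega
          rw [this]
          simp [List.getD]
        · rw [if_neg hc]
          have : ¬ ((i : Int) < height ∧ row ≤ i ∧ i - row < (v :: rest).length) := by
            intro h
            apply hc
            refine ⟨h.1, by omega, ?_⟩
            have := h.2.2
            simp at this
            omega
          rw [if_neg this]

-- per-row view of the whole scatter
def pvRowFold (height : Int) (i : Nat) : List Int → Nat → List (List Int) → List Int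
  | r, _, [] => r
  | r, j, peg :: rest =>
      pvRowFold height i
        (if (i : Int) < height ∧ i < peg.length then r.set j (peg.getD i 0) else r)
        (j + 1) rest

theorem pvScatterAll_get (height : Int) :
    ∀ (pegs : List (List Int)) (g : List (List Int)) (j i : Nat),
      (pvScatterAll height g j pegs)[i]? =
        (g[i]?).map (fun r => pvRowFold height i r j pegs) := by
  intro pegs
  induction pegs with
  | nil =>
      intro g j i
      simp [pvScatterAll, pvRowFold]
  | cons peg rest ih =>
      intro g j i
      simp only [pvScatterAll]
      rw [ih]
      rw [pvScatterPeg_get]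
      simp only [pvRowFold]
      by_cases hc : (i : Int) < height ∧ i < peg.length
      · have hc' : (i : Int) < height ∧ 0 ≤ i ∧ i - 0 < peg.length := by
          exact ⟨hc.1, Nat.zero_le _, by simpa using hc.2⟩
        rw [if_pos hc']
        rw [Option.map_map]
        apply congrArg (fun f => Option.map f g[i]?) ?_
        funext r
        simp only [Function.comp, Nat.sub_zero]
        rw [if_pos hc]
      · have hc' : ¬ ((i : Int) < height ∧ 0 ≤ i ∧ i - 0 < peg.length) := by
          intro h; exact hc ⟨h.1, by simpa using h.2.2⟩
        rw [if_neg hc']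
        apply congrArg (fun f => Option.map f g[i]?) ?_
        funext r
        rw [if_neg hc]

-- helper: set at the junction of an append
theorem pvSetAppend {α : Type} (v x : α) :
    ∀ (pre t : List α), (pre ++ x :: t).set pre.length v = pre ++ v :: t := by
  intro pre
  induction pre with
  | nil => intro t; rfl
  | cons a p ih => intro t; simp [ih]

-- the row fold on a zero tail produces exactly the mapped cells
theorem pvRowFold_replicate (height : Int) (i : Nat) :
    ∀ (pegs : List (List Int)) (pre : List Int),
      pvRowFold height i (pre ++ List.replicate pegs.length 0) pre.length pegs =
        pre ++ pegs.map (pvCell height i) := by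
  intro pegs
  induction pegs with
  | nil => intro pre; simp [pvRowFold]
  | cons peg rest ih =>
      intro pre
      simp only [pvRowFold, List.length_cons, List.replicate_succ, List.map_cons]
      by_cases hc : (i : Int) < height ∧ i < peg.length
      · rw [if_pos hc]
        rw [pvSetAppend]
        have : pre ++ peg.getD i 0 :: List.replicate rest.length 0 =
            (pre ++ [peg.getD i 0]) ++ List.replicate rest.length 0 := by simp
        rw [this]
        have hlen : pre.length + 1 = (pre ++ [peg.getD i 0]).length := by simp
        rw [hlen, ih (pre ++ [peg.getD i 0])]
        simp [pvCell, hc]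
      · rw [if_neg hc]
        have : pre ++ (0 : Int) :: List.replicate rest.length 0 =
            (pre ++ [(0 : Int)]) ++ List.replicate rest.length 0 := by simp
        rw [this]
        have hlen : pre.length + 1 = (pre ++ [(0 : Int)]).length := by simp
        rw [hlen, ih (pre ++ [(0 : Int)])]
        simp [pvCell, hc]

-- B equals the closed form
theorem pvB_closed (pegs : List (List Int)) (height : Int) :
    pegs_to_grid_py_alt pegs height =
      ((List.range height.toNat).map (fun i => pegs.map (pvCell height i))).reverse := by
  unfold pegs_to_grid_py_alt
  congr 1
  apply List.ext_getElem?
  intro i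
  rw [pvScatterAll_get]
  rw [PySem.List.pyRange_one]
  simp only [Int.sub_zero, List.map_map, List.getElem?_map]
  by_cases hi : i < height.toNat
  · rw [List.getElem?_range hi]
    simp only [Option.map_some, Function.comp]
    have := pvRowFold_replicate height i pegs []
    simp only [List.nil_append, List.length_nil] at this
    rw [this]
  · rw [List.getElem?_eq_none (by simpa using Nat.le_of_not_lt hi)]
    rfl

-- ===== VERDICT (by name: the statement is the Claim_ definition above) =====
theorem pegs_to_grid_py_spec : Claim_equal_pegs_to_grid_py := by
  intro pegs height _
  unfold Spec_pegs_to_grid_py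
  rw [pvA_closed, pvB_closed]
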